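-- pv_equiv track=rewrite | github.com/Ry4nW/python-wars | binarysearch/taskHere.py | solve
-- ===== SOURCE A (Python) =====
-- def solve(tasks, people):
--     if not tasks:
--         return 0
--
--     taskCount = 0
--     i = 0
--
--     tasks.sort()
--     people.sort()
--
--     while i < len(people):
--         try:
--             if people[i] >= tasks[i]:
--                 taskCount += 1
--                 i += 1
--             else:
--                 del people[i]
--         except:
--             break
--
--     return taskCount
-- ===== SOURCE B (Python) =====
-- def solve(tasks, people):
--     ts = sorted(tasks)
--     count = 0
--     for p in sorted(people):
--         if count < len(ts) and p >= ts[count]: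
--             count += 1
--     return count
-- ===== Notes on version B (the rewrite author's own statement) =====
-- stated objective: simpler
-- what changed: Replaced A's while-loop that repeatedly deletes from the people list and re-tests the same index by a single for-pass over sorted people with a task-pointer counter, with no mutation and no deletions.
import Mathlib
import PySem

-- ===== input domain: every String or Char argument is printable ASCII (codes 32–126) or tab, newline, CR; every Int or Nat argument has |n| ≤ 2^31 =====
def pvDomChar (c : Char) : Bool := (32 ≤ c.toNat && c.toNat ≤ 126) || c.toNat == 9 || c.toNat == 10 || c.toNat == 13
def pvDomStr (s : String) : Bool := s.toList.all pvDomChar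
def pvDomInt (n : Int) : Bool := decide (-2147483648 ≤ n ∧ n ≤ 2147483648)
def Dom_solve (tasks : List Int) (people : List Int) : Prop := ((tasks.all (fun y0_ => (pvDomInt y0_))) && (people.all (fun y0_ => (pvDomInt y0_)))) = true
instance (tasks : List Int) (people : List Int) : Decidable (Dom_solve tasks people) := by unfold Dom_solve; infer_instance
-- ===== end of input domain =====

-- B replaces A's while-loop with in-place deletions from `people` by a single pass over the
-- sorted people with a task-pointer counter (simpler: no mutation, no deletions); the
-- equivalence is about the RETURN value only: A sorts and deletes from its arguments in
-- place (observable by the caller), B does not mutate them.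

-- ===== PORT A =====
-- while loop of A: state = (people list after deletions, index i, taskCount);
-- `tasks[i]` raising IndexError (the bare `except: break`) is `ts[i]? = none`.
def solveAux (ts : List Int) (ps : List Int) (i count : Nat) : Int :=
  if h : i < ps.length then
    match ts[i]? with
    | none => count
    | some t =>
      if t ≤ ps[i] then solveAux ts ps (i + 1) (count + 1)
      else solveAux ts (ps.eraseIdx i) i count
  else count
termination_by ps.length - i
decreasing_by
  · omega
  · simp [List.length_eraseIdx, h]; omega

def solve (tasks : List Int) (people : List Int) : Int :=
  if tasks.isEmpty then 0
  else solveAux (PySem.List.sorted tasks (fun x => x) false)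
                (PySem.List.sorted people (fun x => x) false) 0 0

-- ===== PORT B =====
-- Source B's loop body: `if count < len(ts) and p >= ts[count]: count += 1`
def altStep (ts : List Int) (c : Nat) (p : Int) : Nat :=
  if h : c < ts.length then (if ts[c] ≤ p then c + 1 else c) else c

def solve_alt (tasks : List Int) (people : List Int) : Int :=
  let ts := PySem.List.sorted tasks (fun x => x) false
  ((PySem.List.sorted people (fun x => x) false).foldl (altStep ts) 0 : Nat)

-- ===== PRECONDITION & SPEC =====
def Spec_solve (tasks : List Int) (people : List Int) (out : Int) : Prop := out = solve_alt tasks people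
instance (tasks : List Int) (people : List Int) (out : Int) : Decidable (Spec_solve tasks people out) := by unfold Spec_solve; infer_instance

-- ===== CLAIM (what is proved, stated in full; the proofs are below) =====
def Claim_equal_solve : Prop := ∀ (tasks : List Int) (people : List Int), Dom_solve tasks people → Spec_solve tasks people (solve tasks people)

-- ===== LEMMAS AND PROOFS =====

-- once the counter has exhausted the tasks, the fold is stuck
lemma foldl_altStep_stuck (ts : List Int) (rs : List Int) (i : Nat) (h : ts.length ≤ i) :
    rs.foldl (altStep ts) i = i := by
  induction rs with
  | nil => rfl
  | cons p rs ih =>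
    have : altStep ts i p = i := by unfold altStep; simp [Nat.not_lt.mpr h]
    simp [List.foldl_cons, this, ih]

-- A's loop started at i = count equals B's fold over the not-yet-examined people
lemma solveAux_eq_foldl (ts : List Int) (ps : List Int) (i : Nat) :
    solveAux ts ps i i = ((ps.drop i).foldl (altStep ts) i : Nat) := by
  by_cases h : i < ps.length
  · have hsplit : (ps.drop i).foldl (altStep ts) i
        = (ps.drop (i + 1)).foldl (altStep ts) (altStep ts i ps[i]) := by
      rw [List.drop_eq_getElem_cons h]; rfl
    rw [solveAux]
    cases hts : ts[i]? with
    | none =>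
      have hlen : ts.length ≤ i := by
        simpa using (List.getElem?_eq_none_iff.mp hts)
      have hstep : altStep ts i ps[i] = i := by
        unfold altStep; simp [Nat.not_lt.mpr hlen]
      rw [hsplit, hstep, foldl_altStep_stuck ts _ i hlen]
      simp [h]
    | some t =>
      have hi : i < ts.length := by
        by_contra hc
        simp [List.getElem?_eq_none_iff.mpr (Nat.le_of_not_lt hc)] at hts
      have ht : ts[i] = t := by
        have := List.getElem?_eq_getElem hi
        rw [hts] at this; exact (Option.some.injEq _ _).mp this.symm
      by_cases hcmp : t ≤ ps[i]
      · have hstep : altStep ts i ps[i] = i + 1 := by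
          unfold altStep; simp [hi, ht, hcmp]
        rw [hsplit, hstep]
        simp only [h, dite_true, hcmp, if_true]
        exact solveAux_eq_foldl ts ps (i + 1)
      · have hstep : altStep ts i ps[i] = i := by
          unfold altStep; simp [hi, ht, hcmp]
        rw [hsplit, hstep]
        simp only [h, dite_true, hcmp, if_false]
        have hdrop : (ps.eraseIdx i).drop i = ps.drop (i + 1) := by
          rw [List.eraseIdx_eq_take_drop_succ, List.drop_append]
          simp [List.length_take, Nat.le_of_lt h]
        rw [solveAux_eq_foldl ts (ps.eraseIdx i) i, hdrop]
  · rw [solveAux]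
    simp [h, List.drop_eq_nil_of_le (Nat.le_of_not_lt h)]
termination_by ps.length - i
decreasing_by
  · omega
  · simp [List.length_eraseIdx, h]; omega

-- ===== VERDICT (by name: the statement is the Claim_ definition above) =====
theorem solve_spec : Claim_equal_solve := by
  intro tasks people _
  unfold Spec_solve solve solve_alt
  by_cases htasks : tasks.isEmpty
  · have hts : PySem.List.sorted tasks (fun x => x) false = [] := by
      rw [List.isEmpty_iff.mp htasks]; rfl
    simp [htasks, hts, foldl_altStep_stuck [] _ 0 (Nat.le_refl 0)]
  · simp only [htasks]
    rw [solveAux_eq_foldl]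
    simp
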